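-- pv_equiv track=rewrite | github.com/hydrusnetwork/hydrus | hydrus/client/metadata/ClientRatings.py | EncodeShapeNameToID
-- ===== SOURCE A (Python) =====
-- def EncodeShapeNameToID(name: str) -> int:
--
--     prefix = 900000000
--     base36 = "0123456789abcdefghijklmnopqrstuvwxyz"
--     value = 0
--
--     for c in name.lower():
--
--         if c not in base36:
--
--             continue
--
--         value *= 36
--
--         value += base36.index(c)
--
--     return prefix + value
-- ===== SOURCE B (Python) =====
-- def EncodeShapeNameToID(name: str) -> int:
--
--     prefix = 900000000
--     base36 = "0123456789abcdefghijklmnopqrstuvwxyz"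
--
--     filtered = ''.join(c for c in name.lower() if c in base36)
--
--     return prefix + (int(filtered, 36) if filtered else 0)
-- ===== Notes on version B (the rewrite author's own statement) =====
-- stated objective: simpler
-- what changed: Replaces the manual Horner multiply-and-add loop with a filter of the name to the base-36 alphabet followed by Python's built-in int(s, 36) parser in C (with a guard returning prefix for the empty filtered string).
import Mathlib
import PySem

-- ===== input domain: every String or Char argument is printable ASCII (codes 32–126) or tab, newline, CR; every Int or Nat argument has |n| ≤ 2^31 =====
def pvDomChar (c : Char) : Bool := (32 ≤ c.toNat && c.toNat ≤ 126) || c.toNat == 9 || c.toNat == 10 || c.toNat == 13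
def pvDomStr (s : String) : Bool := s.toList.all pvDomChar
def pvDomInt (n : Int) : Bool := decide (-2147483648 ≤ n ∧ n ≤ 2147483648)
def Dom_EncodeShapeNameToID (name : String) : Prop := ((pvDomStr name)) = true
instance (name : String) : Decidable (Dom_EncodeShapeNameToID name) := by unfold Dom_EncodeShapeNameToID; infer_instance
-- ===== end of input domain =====

-- B replaces A's manual Horner multiply-and-add loop by filtering the lowered name to the
-- base-36 alphabet and then parsing the filtered string with int(s, 36); objective: simpler.

-- ===== PORT A =====
def pvBase36 : List Char := "0123456789abcdefghijklmnopqrstuvwxyz".toList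

-- A's loop: skip chars not in the alphabet, else value = value*36 + base36.index(c)
def EncodeShapeNameToID (name : String) : Int :=
  900000000 +
    (PySem.Chars.lower name.toList).foldl
      (fun value c =>
        if c ∈ pvBase36 then value * 36 + ((PySem.List.index? pvBase36 c).getD 0 : Int)
        else value) 0

-- ===== PORT B =====
-- hand port of int(s, 36) for strings of lowercase base-36 digits: exact there, since such
-- strings contain no sign, whitespace, underscore or out-of-alphabet character
def pvDigit36 (c : Char) : Int :=
  if c ≤ '9' then (c.toNat : Int) - 48 else (c.toNat : Int) - 97 + 10

def pvInt36 (s : List Char) : Int :=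
  s.foldl (fun acc c => acc * 36 + pvDigit36 c) 0

def EncodeShapeNameToID_alt (name : String) : Int :=
  let filtered := (PySem.Chars.lower name.toList).filter (fun c => c ∈ pvBase36)
  900000000 + (if filtered.isEmpty then 0 else pvInt36 filtered)

-- ===== PRECONDITION & SPEC =====
def Spec_EncodeShapeNameToID (name : String) (out : Int) : Prop := out = EncodeShapeNameToID_alt name
instance (name : String) (out : Int) : Decidable (Spec_EncodeShapeNameToID name out) := by unfold Spec_EncodeShapeNameToID; infer_instance

-- ===== CLAIM (what is proved, stated in full; the proofs are below) =====
def Claim_equal_EncodeShapeNameToID : Prop := ∀ (name : String), Dom_EncodeShapeNameToID name → Spec_EncodeShapeNameToID name (EncodeShapeNameToID name)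

-- ===== LEMMAS AND PROOFS =====

lemma pvDigit_eq (c : Char) (hc : c ∈ pvBase36) :
    ((PySem.List.index? pvBase36 c).getD 0 : Int) = pvDigit36 c := by
  have hall : pvBase36.all
      (fun c => decide (((PySem.List.index? pvBase36 c).getD 0 : Int) = pvDigit36 c)) = true := by
    decide
  have := List.all_eq_true.mp hall c hc
  exact of_decide_eq_true this

lemma pvFold_eq (l : List Char) (v : Int) :
    l.foldl (fun value c =>
        if c ∈ pvBase36 then value * 36 + ((PySem.List.index? pvBase36 c).getD 0 : Int)
        else value) v
      = (l.filter (fun c => c ∈ pvBase36)).foldl (fun acc c => acc * 36 + pvDigit36 c) v := by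
  induction l generalizing v with
  | nil => rfl
  | cons c t ih =>
    simp only [List.foldl_cons, List.filter_cons]
    by_cases hc : c ∈ pvBase36
    · rw [if_pos hc, pvDigit_eq c hc]
      simp only [hc, decide_true, if_pos]
      exact ih _
    · rw [if_neg hc]
      simp only [hc, decide_false, Bool.false_eq_true, if_false]
      exact ih _

-- ===== VERDICT (by name: the statement is the Claim_ definition above) =====
theorem EncodeShapeNameToID_spec : Claim_equal_EncodeShapeNameToID := by
  intro name _
  unfold Spec_EncodeShapeNameToID EncodeShapeNameToID EncodeShapeNameToID_alt pvInt36
  rw [pvFold_eq]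
  cases h : (PySem.Chars.lower name.toList).filter (fun c => c ∈ pvBase36) with
  | nil => simp
  | cons c t => simp
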